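-- pv_equiv track=rewrite | github.com/raeez/chiral-bar-cobar | compute/lib/cy_igusa_fourier_jacobi_engine.py | dim_jacobi_cusp_forms
-- ===== SOURCE A (Python) =====
-- def dim_jacobi_cusp_forms(k: int, m: int) -> int:
--     """
--     Dimension of the space J_{k,m}^{cusp} of Jacobi cusp forms of weight k, index m.
--
--     From Eichler-Zagier (1985), Theorem 5.4 and Theorem 9.1.
--
--     For k >= 3 odd: J_{k,m}^{cusp} = 0.
--     For k >= 2 even:
--       dim J_{k,m}^{cusp} = sum_{j=0}^{m} dim S_{k+2j}(SL_2(Z)) - (adjustment)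
--
--     Simplified formula for m = 1 (EZ Theorem 9.1):
--       dim J_{k,1}^{cusp} = dim S_k + dim S_{k+2} - 1 if k >= 12 and even
--       (with corrections for small k).
--
--     For general m, use the Skoruppa-Zagier formula.
--
--     Here we implement the basic cases needed for our computation.
--     """
--     if k % 2 == 1:
--         return 0  # Odd weight: zero for SL(2,Z)
--     if k < 0:
--         return 0
--
--     if m == 1:
--         return _dim_Jk1_cusp(k)
--     elif m == 2:
--         return _dim_Jk2_cusp(k)
--     elif m == 3:
--         return _dim_Jk3_cusp(k)
--     else:
--         # General formula: use the Eichler-Zagier theorem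
--         # dim J_{k,m}^cusp = sum_{j=0}^{m-1} dim S_{k+2j} (for k sufficiently large)
--         # This is an approximation; exact for k >> m.
--         if k >= 2 * m + 12:
--             return sum(_dim_Sk(k + 2 * j) for j in range(m))
--         else:
--             raise NotImplementedError(f"dim J_{{{k},{m}}}^cusp not implemented for small k")
--
-- def _dim_Sk(k: int) -> int:
--     """Dimension of S_k(SL(2,Z)), the space of weight-k cusp forms."""
--     if k < 0 or k % 2 == 1:
--         return 0
--     if k == 0:
--         return 0
--     if k == 2:
--         return 0
--     if k < 12:
--         return 0
--     if k == 12: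
--         return 1
--     # General: dim S_k = floor(k/12) - 1 if k ≡ 2 mod 12, else floor(k/12)
--     q, r = divmod(k, 12)
--     if r == 2:
--         return q - 1
--     return q
--
-- def _dim_Jk1_cusp(k: int) -> int:
--     """dim J_{k,1}^{cusp} from EZ Theorem 9.1."""
--     if k < 0 or k % 2 == 1:
--         return 0
--     # Table from Eichler-Zagier:
--     # k:  0  2  4  6  8  10  12  14  16  18  20  ...
--     # dim: 0  0  0  0  0   1   1   1   1   2   2  ...
--     table = {0: 0, 2: 0, 4: 0, 6: 0, 8: 0, 10: 1, 12: 1, 14: 1, 16: 1,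
--              18: 2, 20: 2, 22: 2, 24: 3, 26: 3, 28: 3, 30: 4}
--     if k in table:
--         return table[k]
--     # General: approximately floor((k-4)/6) for large k
--     # More precisely: dim J_{k,1}^cusp = dim S_k + dim S_{k+2} - delta_{k>=12}
--     # Actually use EZ formula:
--     return _dim_Sk(k) + _dim_Sk(k + 2) - (1 if k >= 4 else 0)
--
-- def _dim_Jk2_cusp(k: int) -> int:
--     """dim J_{k,2}^{cusp} from Skoruppa-Zagier."""
--     if k < 0 or k % 2 == 1:
--         return 0
--     # Table for small k:
--     table = {0: 0, 2: 0, 4: 0, 6: 0, 8: 1, 10: 1, 12: 2, 14: 2,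
--              16: 3, 18: 4, 20: 4}
--     if k in table:
--         return table[k]
--     return sum(_dim_Sk(k + 2 * j) for j in range(2))
--
-- def _dim_Jk3_cusp(k: int) -> int:
--     """dim J_{k,3}^{cusp}."""
--     if k < 0 or k % 2 == 1:
--         return 0
--     table = {0: 0, 2: 0, 4: 0, 6: 1, 8: 1, 10: 2, 12: 3, 14: 4}
--     if k in table:
--         return table[k]
--     return sum(_dim_Sk(k + 2 * j) for j in range(3))
-- ===== SOURCE B (Python) =====
-- def dim_jacobi_cusp_forms(k: int, m: int) -> int:
--     """Dimension of J_{k,m}^{cusp} (Jacobi cusp forms), closed-form O(1) version."""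
--     if k % 2 == 1 or k < 0:
--         return 0
--     if m in (1, 2, 3):
--         table = _SMALL_TABLES[m]
--         if k < 2 * len(table):
--             return table[k // 2]
--         if m == 1:
--             return _sum_dim_Sk(k, 2) - 1
--         return _sum_dim_Sk(k, m)
--     if k >= 2 * m + 12:
--         return _sum_dim_Sk(k, m)
--     raise NotImplementedError(f"dim J_{{{k},{m}}}^cusp not implemented for small k")
--
--
-- # tables indexed by k//2 (same values as Eichler-Zagier tables, k = 0,2,4,...)
-- _SMALL_TABLES = {
--     1: (0, 0, 0, 0, 0, 1, 1, 1, 1, 2, 2, 2, 3, 3, 3, 4),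
--     2: (0, 0, 0, 0, 1, 1, 2, 2, 3, 4, 4),
--     3: (0, 0, 0, 1, 1, 2, 3, 4),
-- }
--
--
-- def _dim_Sk_large(t: int) -> int:
--     # dim S_t for even t >= 12: floor(t/12), minus 1 when t = 2 mod 12
--     return t // 12 - (1 if t % 12 == 2 else 0)
--
--
-- def _sum_dim_Sk(k: int, n: int) -> int:
--     """sum of dim S_{k+2j} for j in range(n), for even k >= 12, in O(1).
--
--     dim S_{k+2(j+6)} = dim S_{k+2j} + 1, so the sum over each block of 6
--     consecutive j grows linearly: with n = 6q + s,
--       total = q*B + 3q(q-1) + R + s*q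
--     where B is the sum over one period (j < 6) and R the partial sum (j < s).
--     """
--     if n <= 0:
--         return 0
--     q, s = divmod(n, 6)
--     base = sum(_dim_Sk_large(k + 2 * j) for j in range(6))
--     rem = sum(_dim_Sk_large(k + 2 * j) for j in range(s))
--     return q * base + 3 * q * (q - 1) + rem + s * q
-- ===== Notes on version B (the rewrite author's own statement) =====
-- stated objective: faster
-- what changed: Replaces A's O(m) loop summing dim S_{k+2j} with a closed-form block formula (the summand increases by exactly 1 every 6 steps, so the sum is q*B + 3q(q-1) + R + s*q with n = 6q+s and two fixed sums of at most 6 terms), and replaces the three small-index dict tables with tuples indexed by k//2.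
import Mathlib
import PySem

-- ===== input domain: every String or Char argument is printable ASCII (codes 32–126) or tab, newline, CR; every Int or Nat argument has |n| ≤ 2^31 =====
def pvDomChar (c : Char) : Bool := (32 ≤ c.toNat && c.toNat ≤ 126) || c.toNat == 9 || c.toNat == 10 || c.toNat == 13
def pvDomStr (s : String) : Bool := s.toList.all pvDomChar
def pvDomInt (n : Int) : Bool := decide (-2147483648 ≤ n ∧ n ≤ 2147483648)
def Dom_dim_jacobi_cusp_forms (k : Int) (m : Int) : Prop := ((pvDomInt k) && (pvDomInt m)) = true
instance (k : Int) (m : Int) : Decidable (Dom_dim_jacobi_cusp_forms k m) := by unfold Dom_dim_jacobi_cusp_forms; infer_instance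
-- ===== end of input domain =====

-- B replaces A's O(m) summation of dim S_{k+2j} by a closed-form block formula (O(1)),
-- and the three small-index dicts by tuples indexed k//2; equivalence of return values.

-- ===== PORT A =====
def pyDimSk (k : Int) : Int :=
  if k < 0 ∨ PySem.Int.mod k 2 = 1 then 0
  else if k = 0 then 0
  else if k = 2 then 0
  else if k < 12 then 0
  else if k = 12 then 1
  else
    let q := PySem.Int.floordiv k 12
    let r := PySem.Int.mod k 12
    if r = 2 then q - 1 else q

def pyTable1 : PySem.Dict Int Int :=
  PySem.Dict.ofList [(0,0),(2,0),(4,0),(6,0),(8,0),(10,1),(12,1),(14,1),(16,1),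
                     (18,2),(20,2),(22,2),(24,3),(26,3),(28,3),(30,4)]

def pyDimJk1 (k : Int) : Int :=
  if k < 0 ∨ PySem.Int.mod k 2 = 1 then 0
  else match pyTable1.get? k with
    | some v => v
    | none => pyDimSk k + pyDimSk (k + 2) - (if 4 ≤ k then 1 else 0)

def pyTable2 : PySem.Dict Int Int :=
  PySem.Dict.ofList [(0,0),(2,0),(4,0),(6,0),(8,1),(10,1),(12,2),(14,2),(16,3),(18,4),(20,4)]

def pyDimJk2 (k : Int) : Int :=
  if k < 0 ∨ PySem.Int.mod k 2 = 1 then 0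
  else match pyTable2.get? k with
    | some v => v
    | none => (PySem.List.pyRange 0 2 1).foldl (fun a j => a + pyDimSk (k + 2 * j)) 0

def pyTable3 : PySem.Dict Int Int :=
  PySem.Dict.ofList [(0,0),(2,0),(4,0),(6,1),(8,1),(10,2),(12,3),(14,4)]

def pyDimJk3 (k : Int) : Int :=
  if k < 0 ∨ PySem.Int.mod k 2 = 1 then 0
  else match pyTable3.get? k with
    | some v => v
    | none => (PySem.List.pyRange 0 3 1).foldl (fun a j => a + pyDimSk (k + 2 * j)) 0

def dim_jacobi_cusp_forms (k : Int) (m : Int) : Int :=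
  if PySem.Int.mod k 2 = 1 then 0
  else if k < 0 then 0
  else if m = 1 then pyDimJk1 k
  else if m = 2 then pyDimJk2 k
  else if m = 3 then pyDimJk3 k
  else if 2 * m + 12 ≤ k then
    (PySem.List.pyRange 0 m 1).foldl (fun a j => a + pyDimSk (k + 2 * j)) 0
  else 0  -- Python raises NotImplementedError here; excluded by Pre_

-- ===== PORT B =====
def altDimSkLarge (t : Int) : Int :=
  PySem.Int.floordiv t 12 - (if PySem.Int.mod t 12 = 2 then 1 else 0)

def altSumDimSk (k : Int) (n : Int) : Int :=
  if n ≤ 0 then 0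
  else
    let q := PySem.Int.floordiv n 6
    let s := PySem.Int.mod n 6
    let base := (PySem.List.pyRange 0 6 1).foldl (fun a j => a + altDimSkLarge (k + 2 * j)) 0
    let rem := (PySem.List.pyRange 0 s 1).foldl (fun a j => a + altDimSkLarge (k + 2 * j)) 0
    q * base + 3 * q * (q - 1) + rem + s * q

def altTable (m : Int) : List Int :=
  if m = 1 then [0,0,0,0,0,1,1,1,1,2,2,2,3,3,3,4]
  else if m = 2 then [0,0,0,0,1,1,2,2,3,4,4]
  else [0,0,0,1,1,2,3,4]

def dim_jacobi_cusp_forms_alt (k : Int) (m : Int) : Int :=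
  if PySem.Int.mod k 2 = 1 ∨ k < 0 then 0
  else if m = 1 ∨ m = 2 ∨ m = 3 then
    let table := altTable m
    if k < 2 * (table.length : Int) then
      -- in-range by the guard (Python indexing cannot raise here), so pyGetD is exact
      PySem.List.pyGetD table (PySem.Int.floordiv k 2) 0
    else if m = 1 then altSumDimSk k 2 - 1
    else altSumDimSk k m
  else if 2 * m + 12 ≤ k then altSumDimSk k m
  else 0  -- Python raises NotImplementedError here; excluded by Pre_

-- ===== PRECONDITION & SPEC =====
-- Pre_ excludes exactly the inputs on which A raises NotImplementedError:
-- even k ≥ 0 with m ∉ {1,2,3} and k < 2m+12.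
def Pre_dim_jacobi_cusp_forms (k : Int) (m : Int) : Prop :=
  PySem.Int.mod k 2 = 1 ∨ k < 0 ∨ m = 1 ∨ m = 2 ∨ m = 3 ∨ 2 * m + 12 ≤ k
instance (k : Int) (m : Int) : Decidable (Pre_dim_jacobi_cusp_forms k m) := by
  unfold Pre_dim_jacobi_cusp_forms; infer_instance

def pvWitness_dim_jacobi_cusp_forms : Int × Int := (20, 4)

def Spec_dim_jacobi_cusp_forms (k : Int) (m : Int) (out : Int) : Prop := out = dim_jacobi_cusp_forms_alt k m
instance (k : Int) (m : Int) (out : Int) : Decidable (Spec_dim_jacobi_cusp_forms k m out) := by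
  unfold Spec_dim_jacobi_cusp_forms; infer_instance

-- ===== CLAIM (what is proved, stated in full; the proofs are below) =====
def Claim_equal_dim_jacobi_cusp_forms : Prop := ∀ (k : Int) (m : Int), Dom_dim_jacobi_cusp_forms k m → Pre_dim_jacobi_cusp_forms k m → Spec_dim_jacobi_cusp_forms k m (dim_jacobi_cusp_forms k m)

-- ===== LEMMAS AND PROOFS =====

theorem pv_mod2 (a : Int) : PySem.Int.mod a 2 = a % 2 :=
  PySem.Int.mod_eq_emod_of_pos (by norm_num)

theorem pv_mod12 (a : Int) : PySem.Int.mod a 12 = a % 12 :=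
  PySem.Int.mod_eq_emod_of_pos (by norm_num)

theorem pv_div12 (a : Int) : PySem.Int.floordiv a 12 = a / 12 :=
  PySem.Int.floordiv_eq_ediv_of_pos (by norm_num)

-- A's _dim_Sk agrees with B's large-weight formula on even k ≥ 12
theorem dimSk_eq_large (t : Int) (ht : 12 ≤ t) (he : t % 2 = 0) :
    pyDimSk t = altDimSkLarge t := by
  simp only [pyDimSk, altDimSkLarge, pv_mod2, pv_mod12, pv_div12]
  split_ifs <;> omega

theorem altDimSkLarge_add12 (t : Int) : altDimSkLarge (t + 12) = altDimSkLarge t + 1 := by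
  simp only [altDimSkLarge, pv_mod12, pv_div12]
  split_ifs <;> omega

-- proof-side sum: gsum k n = Σ_{j<n} altDimSkLarge (k + 2j)
def gsum (k : Int) : Nat → Int
  | 0 => 0
  | n + 1 => gsum k n + altDimSkLarge (k + 2 * (n : Int))

theorem foldl_range_gsum (k : Int) (N : Nat) :
    (List.range N).foldl (fun a (j : Nat) => a + altDimSkLarge (k + 2 * (j : Int))) 0 = gsum k N := by
  induction N with
  | zero => simp [gsum]
  | succ n ih => rw [List.range_succ, List.foldl_append, ih]; simp [gsum]

theorem pyfold_gsum (k n : Int) (_hn : 0 ≤ n) :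
    (PySem.List.pyRange 0 n 1).foldl (fun a j => a + altDimSkLarge (k + 2 * j)) 0 = gsum k n.toNat := by
  rw [PySem.List.pyRange_one, List.foldl_map]
  simp only [zero_add, Int.sub_zero]
  exact foldl_range_gsum k n.toNat

theorem gsum_shift6 (k : Int) (n : Nat) :
    gsum k (n + 6) = gsum k n + gsum k 6 + (n : Int) := by
  induction n with
  | zero => simp [gsum]
  | succ n ih =>
    have h1 : n + 1 + 6 = (n + 6) + 1 := by omega
    rw [h1]
    show gsum k (n + 6) + altDimSkLarge (k + 2 * ((n + 6 : Nat) : Int)) = _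
    have h2 : (k : Int) + 2 * ((n + 6 : Nat) : Int) = (k + 2 * (n : Int)) + 12 := by
      push_cast; ring
    rw [h2, altDimSkLarge_add12, ih,
        show gsum k (n + 1) = gsum k n + altDimSkLarge (k + 2 * (n : Int)) from rfl]
    push_cast; ring

theorem gsum_closed (k : Int) (q s : Nat) :
    gsum k (6 * q + s) =
      (q : Int) * gsum k 6 + 3 * (q : Int) * ((q : Int) - 1) + gsum k s + (s : Int) * (q : Int) := by
  induction q with
  | zero => simp
  | succ q ih =>
    have h : 6 * (q + 1) + s = (6 * q + s) + 6 := by omega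
    rw [h, gsum_shift6, ih]
    push_cast; ring

theorem altSum_eq_gsum (k n : Int) (hn : 1 ≤ n) :
    altSumDimSk k n = gsum k n.toNat := by
  unfold altSumDimSk
  rw [if_neg (by omega)]
  have hq : PySem.Int.floordiv n 6 = n / 6 := PySem.Int.floordiv_eq_ediv_of_pos (by norm_num)
  have hs : PySem.Int.mod n 6 = n % 6 := PySem.Int.mod_eq_emod_of_pos (by norm_num)
  simp only [hq, hs]
  rw [pyfold_gsum k 6 (by norm_num), pyfold_gsum k (n % 6) (Int.emod_nonneg n (by norm_num))]
  have hdecomp : n.toNat = 6 * (n / 6).toNat + (n % 6).toNat := by omega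
  rw [hdecomp, gsum_closed]
  have c1 : (((n / 6).toNat : Int)) = n / 6 := by omega
  have c2 : (((n % 6).toNat : Int)) = n % 6 := by omega
  rw [c1, c2, show ((6:Int)).toNat = 6 from rfl]

theorem A_fold_eq (k m : Int) (hk : 12 ≤ k) (he : k % 2 = 0) :
    (PySem.List.pyRange 0 m 1).foldl (fun a j => a + pyDimSk (k + 2 * j)) 0 =
    (PySem.List.pyRange 0 m 1).foldl (fun a j => a + altDimSkLarge (k + 2 * j)) 0 := by
  apply PySem.List.foldl_congr_mem
  intro acc x hx
  have hx0 : 0 ≤ x := ((PySem.List.mem_pyRange_one).1 hx).1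
  rw [dimSk_eq_large (k + 2 * x) (by omega) (by omega)]

theorem main_sum (k m : Int) (hk : 12 ≤ k) (he : k % 2 = 0) (hm : 1 ≤ m) :
    (PySem.List.pyRange 0 m 1).foldl (fun a j => a + pyDimSk (k + 2 * j)) 0 = altSumDimSk k m := by
  rw [A_fold_eq k m hk he, pyfold_gsum k m (by omega), altSum_eq_gsum k m hm]

theorem gsum_two (k : Int) : gsum k 2 = altDimSkLarge k + altDimSkLarge (k + 2) := by
  show 0 + altDimSkLarge (k + 2 * ((0:Nat):Int)) + altDimSkLarge (k + 2 * ((1:Nat):Int)) = _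
  norm_num

theorem get1_none (k : Int) (h : 32 ≤ k) : pyTable1.get? k = none := by
  simp [pyTable1, PySem.Dict.ofList, PySem.Dict.get?]
  intro a b hab
  rw [show (PySem.Dict.empty.update [((0:Int),(0:Int)),(2,0),(4,0),(6,0),(8,0),(10,1),(12,1),(14,1),(16,1),
      (18,2),(20,2),(22,2),(24,3),(26,3),(28,3),(30,4)]).items
      = [(0,0),(2,0),(4,0),(6,0),(8,0),(10,1),(12,1),(14,1),(16,1),
         (18,2),(20,2),(22,2),(24,3),(26,3),(28,3),(30,4)] from by decide] at hab
  simp at hab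
  omega

theorem get2_none (k : Int) (h : 22 ≤ k) : pyTable2.get? k = none := by
  simp [pyTable2, PySem.Dict.ofList, PySem.Dict.get?]
  intro a b hab
  rw [show (PySem.Dict.empty.update [((0:Int),(0:Int)),(2,0),(4,0),(6,0),(8,1),(10,1),(12,2),(14,2),(16,3),(18,4),(20,4)]).items
      = [(0,0),(2,0),(4,0),(6,0),(8,1),(10,1),(12,2),(14,2),(16,3),(18,4),(20,4)] from by decide] at hab
  simp at hab
  omega

theorem get3_none (k : Int) (h : 16 ≤ k) : pyTable3.get? k = none := by
  simp [pyTable3, PySem.Dict.ofList, PySem.Dict.get?]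
  intro a b hab
  rw [show (PySem.Dict.empty.update [((0:Int),(0:Int)),(2,0),(4,0),(6,1),(8,1),(10,2),(12,3),(14,4)]).items
      = [(0,0),(2,0),(4,0),(6,1),(8,1),(10,2),(12,3),(14,4)] from by decide] at hab
  simp at hab
  omega

-- ===== VERDICT (by name: the statement is the Claim_ definition above) =====
theorem dim_jacobi_cusp_forms_spec : Claim_equal_dim_jacobi_cusp_forms := by
  intro k m _ hpre
  unfold Spec_dim_jacobi_cusp_forms
  have h2 : PySem.Int.mod k 2 = k % 2 := pv_mod2 k
  by_cases hodd : k % 2 = 1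
  · simp [dim_jacobi_cusp_forms, dim_jacobi_cusp_forms_alt, hodd]
  by_cases hneg : k < 0
  · simp [dim_jacobi_cusp_forms, dim_jacobi_cusp_forms_alt, hodd, hneg]
  have hke : k % 2 = 0 := by omega
  have hk0 : 0 ≤ k := by omega
  by_cases hm1 : m = 1
  · subst hm1
    by_cases hks : k < 32
    · interval_cases k <;> decide
    · rw [show dim_jacobi_cusp_forms k 1 = pyDimJk1 k from by
        simp [dim_jacobi_cusp_forms, hodd, hneg]]
      rw [show dim_jacobi_cusp_forms_alt k 1 = altSumDimSk k 2 - 1 from by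
        norm_num [dim_jacobi_cusp_forms_alt, altTable, hodd, hneg, hks]]
      simp only [pyDimJk1, h2]
      rw [if_neg (by omega), get1_none k (by omega)]
      rw [if_pos (by omega : (4:Int) ≤ k)]
      show pyDimSk k + pyDimSk (k + 2) - 1 = _
      rw [altSum_eq_gsum k 2 (by norm_num), show ((2:Int)).toNat = 2 from rfl, gsum_two,
          dimSk_eq_large k (by omega) hke, dimSk_eq_large (k+2) (by omega) (by omega)]
  by_cases hm2 : m = 2
  · subst hm2
    by_cases hks : k < 22
    · interval_cases k <;> decide
    · rw [show dim_jacobi_cusp_forms k 2 = pyDimJk2 k from by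
        simp [dim_jacobi_cusp_forms, hodd, hneg]]
      rw [show dim_jacobi_cusp_forms_alt k 2 = altSumDimSk k 2 from by
        norm_num [dim_jacobi_cusp_forms_alt, altTable, hodd, hneg, hks]]
      simp only [pyDimJk2, h2]
      rw [if_neg (by omega), get2_none k (by omega)]
      exact main_sum k 2 (by omega) hke (by norm_num)
  by_cases hm3 : m = 3
  · subst hm3
    by_cases hks : k < 16
    · interval_cases k <;> decide
    · rw [show dim_jacobi_cusp_forms k 3 = pyDimJk3 k from by
        simp [dim_jacobi_cusp_forms, hodd, hneg]]
      rw [show dim_jacobi_cusp_forms_alt k 3 = altSumDimSk k 3 from by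
        norm_num [dim_jacobi_cusp_forms_alt, altTable, hodd, hneg, hks]]
      simp only [pyDimJk3, h2]
      rw [if_neg (by omega), get3_none k (by omega)]
      exact main_sum k 3 (by omega) hke (by norm_num)
  -- general m: Pre_ gives 2m+12 ≤ k
  have hk : 2 * m + 12 ≤ k := by
    rcases hpre with h | h | h | h | h | h
    · rw [h2] at h; omega
    · omega
    · exact absurd h hm1
    · exact absurd h hm2
    · exact absurd h hm3
    · exact h
  rw [show dim_jacobi_cusp_forms k m =
      (PySem.List.pyRange 0 m 1).foldl (fun a j => a + pyDimSk (k + 2 * j)) 0 from by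
    simp [dim_jacobi_cusp_forms, hodd, hneg, hm1, hm2, hm3, hk]]
  rw [show dim_jacobi_cusp_forms_alt k m = altSumDimSk k m from by
    simp [dim_jacobi_cusp_forms_alt, hodd, hneg, hm1, hm2, hm3, hk]]
  by_cases hmp : 1 ≤ m
  · exact main_sum k m (by omega) hke hmp
  · rw [PySem.List.pyRange_one]
    rw [show ((m : Int) - 0).toNat = 0 from by omega]
    simp [altSumDimSk, (by omega : m ≤ 0)]
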